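-- pv_equiv track=rewrite | github.com/taylorjohn/NEMO-WM | core/arc_relation_graph.py | symmetry_flags
-- ===== SOURCE A (Python) =====
-- def symmetry_flags(cells):
--     """Compute which D4 symmetries the shape possesses."""
--     rs = [r for r, c in cells]
--     cs = [c for r, c in cells]
--     min_r, min_c = min(rs), min(cs)
--     max_r, max_c = max(rs), max(cs)
--     norm = set((r - min_r, c - min_c) for r, c in cells)
--     h, w = max_r - min_r, max_c - min_c
--
--     flags = {}
--     # Horizontal flip
--     flags['hflip'] = norm == set((r, w - c) for r, c in norm)
--     # Vertical flip
--     flags['vflip'] = norm == set((h - r, c) for r, c in norm)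
--     # 180° rotation
--     flags['rot180'] = norm == set((h - r, w - c) for r, c in norm)
--     # 90° rotation (only if square-ish)
--     if h == w:
--         flags['rot90'] = norm == set((c, h - r) for r, c in norm)
--     else:
--         flags['rot90'] = False
--
--     return flags
-- ===== SOURCE B (Python) =====
-- def _group_fst(pts):
--     """Group a lex-sorted list of pairs into (key, [second components]) runs."""
--     out = []
--     i = 0
--     n = len(pts)
--     while i < n:
--         k = pts[i][0]
--         vals = []
--         while i < n and pts[i][0] == k:
--             vals.append(pts[i][1])
--             i += 1
--         out.append((k, vals))
--     return out
--
--
-- def symmetry_flags(cells):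
--     """Compute which D4 symmetries the shape possesses."""
--     min_r = min(r for r, c in cells)
--     min_c = min(c for r, c in cells)
--     h = max(r for r, c in cells) - min_r
--     w = max(c for r, c in cells) - min_c
--     pts = sorted({(r - min_r, c - min_c) for r, c in cells})
--     rows = _group_fst(pts)                              # row -> ascending column list
--     cols = _group_fst(sorted((c, r) for r, c in pts))   # col -> ascending row list
--
--     def rc(m, L):  # reflect an ascending list: still ascending
--         return [m - x for x in reversed(L)]
--
--     return {
--         'hflip': rows == [(r, rc(w, L)) for r, L in rows],
--         'vflip': rows == [(h - r, L) for r, L in reversed(rows)],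
--         'rot180': rows == [(h - r, rc(w, L)) for r, L in reversed(rows)],
--         'rot90': h == w and rows == [(c, rc(h, L)) for c, L in cols],
--     }
-- ===== Notes on version B (the rewrite author's own statement) =====
-- stated objective: alternative
-- what changed: B replaces A's four hash-set constructions and set-equality tests by a canonical sorted group-by representation (row -> ascending column list, plus its transpose): each symmetry becomes an equality between that canonical form and a structurally rearranged copy of itself (list reversal plus per-element complement), so no transformed point set is ever built.
import Mathlib
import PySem

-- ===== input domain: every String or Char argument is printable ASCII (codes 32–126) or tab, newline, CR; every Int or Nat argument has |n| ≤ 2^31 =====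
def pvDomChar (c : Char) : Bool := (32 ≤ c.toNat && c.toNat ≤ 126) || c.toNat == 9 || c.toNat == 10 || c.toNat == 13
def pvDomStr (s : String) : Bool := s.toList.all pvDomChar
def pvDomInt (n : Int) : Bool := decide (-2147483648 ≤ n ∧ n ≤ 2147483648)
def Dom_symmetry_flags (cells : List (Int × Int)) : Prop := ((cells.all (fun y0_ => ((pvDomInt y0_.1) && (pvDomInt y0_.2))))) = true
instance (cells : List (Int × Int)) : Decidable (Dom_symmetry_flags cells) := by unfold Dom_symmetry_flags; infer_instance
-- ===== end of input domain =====

-- B computes a canonical sorted group-by form (row -> ascending column list, and its transpose)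
-- and decides each symmetry as an equality of that form with a reversed/complemented rearrangement
-- of itself, instead of A's four transformed hash sets compared for set equality (objective: alternative).

-- ===== PORT A =====
def symmetry_flags (cells : List (Int × Int)) : List (String × Bool) :=
  let rs := cells.map (fun p => p.1)
  let cs := cells.map (fun p => p.2)
  match PySem.List.min? rs (fun x => x), PySem.List.min? cs (fun x => x),
        PySem.List.max? rs (fun x => x), PySem.List.max? cs (fun x => x) with
  | some min_r, some min_c, some max_r, some max_c =>
    let norm : PySem.Set (Int × Int) :=
      PySem.Set.ofList (cells.map (fun p => (p.1 - min_r, p.2 - min_c)))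
    let h := max_r - min_r
    let w := max_c - min_c
    let hflip := PySem.Set.equal norm (PySem.Set.ofList (norm.map (fun p => (p.1, w - p.2))))
    let vflip := PySem.Set.equal norm (PySem.Set.ofList (norm.map (fun p => (h - p.1, p.2))))
    let rot180 := PySem.Set.equal norm (PySem.Set.ofList (norm.map (fun p => (h - p.1, w - p.2))))
    let rot90 := if h = w then
        PySem.Set.equal norm (PySem.Set.ofList (norm.map (fun p => (p.2, h - p.1))))
      else false
    [("hflip", hflip), ("vflip", vflip), ("rot180", rot180), ("rot90", rot90)]
  | _, _, _, _ => []          -- unreachable under Pre_ (cells ≠ []): min/max of [] is none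

-- ===== PORT B =====
-- _group_fst: group a lex-sorted list of pairs into (key, [second components]) runs
-- (the Python inner while-loop collecting one run is the takeWhile/dropWhile split).
def pvGroupFst : List (Int × Int) → List (Int × List Int)
  | [] => []
  | (r, c) :: rest =>
      (r, c :: (rest.takeWhile (fun q => q.1 == r)).map (fun q => q.2)) ::
      pvGroupFst (rest.dropWhile (fun q => q.1 == r))
  termination_by l => l.length
  decreasing_by
    simp only [List.length_cons]
    exact Nat.lt_succ_of_le (List.length_dropWhile_le _ _)

def symmetry_flags_alt (cells : List (Int × Int)) : List (String × Bool) :=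
  match PySem.List.min? (cells.map (fun p => p.1)) (fun x => x) with
  | none => []          -- unreachable under Pre_ (cells ≠ []): min of [] is none
  | some min_r =>
  match PySem.List.min? (cells.map (fun p => p.2)) (fun x => x) with
  | none => []
  | some min_c =>
  match PySem.List.max? (cells.map (fun p => p.1)) (fun x => x) with
  | none => []
  | some max_r =>
  match PySem.List.max? (cells.map (fun p => p.2)) (fun x => x) with
  | none => []
  | some max_c =>
    let h := max_r - min_r
    let w := max_c - min_c
    -- sorted(set(...)): Python tuple comparison is the lexicographic order, exactly '<' on Int ×ₗ Int
    let pts := PySem.List.sorted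
      (PySem.Set.ofList (cells.map (fun p => (p.1 - min_r, p.2 - min_c)))) (fun p => toLex p) false
    let rows := pvGroupFst pts
    let cols := pvGroupFst (PySem.List.sorted (pts.map (fun p => (p.2, p.1))) (fun p => toLex p) false)
    let rc := fun (m : Int) (L : List Int) => L.reverse.map (fun x => m - x)
    [("hflip", decide (rows = rows.map (fun g => (g.1, rc w g.2)))),
     ("vflip", decide (rows = rows.reverse.map (fun g => (h - g.1, g.2)))),
     ("rot180", decide (rows = rows.reverse.map (fun g => (h - g.1, rc w g.2)))),
     ("rot90", decide (h = w) && decide (rows = cols.map (fun g => (g.1, rc h g.2))))]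

-- ===== PRECONDITION & SPEC =====
-- Pre_ excludes only the empty list, on which A raises ValueError (min of an empty sequence).
def Pre_symmetry_flags (cells : List (Int × Int)) : Prop := cells ≠ []
instance (cells : List (Int × Int)) : Decidable (Pre_symmetry_flags cells) := by unfold Pre_symmetry_flags; infer_instance
def pvWitness_symmetry_flags : (List (Int × Int)) := [(0, 0), (1, 1)]

def Spec_symmetry_flags (cells : List (Int × Int)) (out : List (String × Bool)) : Prop := out = symmetry_flags_alt cells
instance (cells : List (Int × Int)) (out : List (String × Bool)) : Decidable (Spec_symmetry_flags cells out) := by unfold Spec_symmetry_flags; infer_instance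

-- ===== CLAIM (what is proved, stated in full; the proofs are below) =====
def Claim_equal_symmetry_flags : Prop := ∀ (cells : List (Int × Int)), Dom_symmetry_flags cells → Pre_symmetry_flags cells → Spec_symmetry_flags cells (symmetry_flags cells)

-- ===== LEMMAS AND PROOFS =====

-- membership through a grouping
def pvMemG (gl : List (Int × List Int)) (p : Int × Int) : Prop := ∃ L, (p.1, L) ∈ gl ∧ p.2 ∈ L

-- a well-formed grouping: keys strictly increasing, each run nonempty and strictly increasing
def pvGood (gl : List (Int × List Int)) : Prop :=
  gl.Pairwise (fun a b => a.1 < b.1) ∧ ∀ g ∈ gl, g.2 ≠ [] ∧ g.2.Pairwise (· < ·)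

theorem pvMemG_cons (g : Int × List Int) (gl : List (Int × List Int)) (p : Int × Int) :
    pvMemG (g :: gl) p ↔ (p.1 = g.1 ∧ p.2 ∈ g.2) ∨ pvMemG gl p := by
  constructor
  · rintro ⟨L, hL, hc⟩
    rcases List.mem_cons.mp hL with h | h
    · exact Or.inl ⟨congrArg Prod.fst h ▸ rfl, by rw [← show L = g.2 from congrArg Prod.snd h] at *; exact hc⟩
    · exact Or.inr ⟨L, h, hc⟩
  · rintro (⟨h1, h2⟩ | ⟨L, hL, hc⟩)
    · exact ⟨g.2, by rw [h1]; exact List.mem_cons_self, h2⟩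
    · exact ⟨L, List.mem_cons_of_mem _ hL, hc⟩

-- two strictly increasing Int lists with the same members are equal
theorem pv_sorted_ext (l l' : List Int) (hl : l.Pairwise (· < ·)) (hl' : l'.Pairwise (· < ·))
    (hm : ∀ x, x ∈ l ↔ x ∈ l') : l = l' := by
  induction l generalizing l' with
  | nil =>
    cases l' with
    | nil => rfl
    | cons y t => exact absurd ((hm y).mpr List.mem_cons_self) (List.not_mem_nil)
  | cons x t ih =>
    cases l' with
    | nil => exact absurd ((hm x).mp List.mem_cons_self) (List.not_mem_nil)
    | cons y t' =>
      have hxy : x = y := by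
        have hx := (hm x).mp List.mem_cons_self
        have hy := (hm y).mpr List.mem_cons_self
        rcases List.mem_cons.mp hx with h | h
        · exact h
        · rcases List.mem_cons.mp hy with h' | h'
          · exact h'.symm
          · have := (List.pairwise_cons.mp hl).1 y h'
            have := (List.pairwise_cons.mp hl').1 x h
            omega
      subst hxy
      have ht : t = t' := by
        apply ih t' (List.pairwise_cons.mp hl).2 (List.pairwise_cons.mp hl').2
        intro z
        constructor
        · intro hz
          have := (hm z).mp (List.mem_cons_of_mem _ hz)
          rcases List.mem_cons.mp this with h | h
          · exact absurd (h ▸ hz) (by have := (List.pairwise_cons.mp hl).1 z hz; intro _; omega)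
          · exact h
        · intro hz
          have := (hm z).mpr (List.mem_cons_of_mem _ hz)
          rcases List.mem_cons.mp this with h | h
          · exact absurd (h ▸ hz) (by have := (List.pairwise_cons.mp hl').1 z hz; intro _; omega)
          · exact h
      rw [ht]

-- a well-formed grouping contains some cell with any of its keys
theorem pv_good_key_mem (gl : List (Int × List Int)) (hg : pvGood gl) (g : Int × List Int)
    (hmem : g ∈ gl) : ∃ c, pvMemG gl (g.1, c) := by
  obtain ⟨hne, _⟩ := hg.2 g hmem
  obtain ⟨c, hc⟩ := List.exists_mem_of_ne_nil g.2 hne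
  exact ⟨c, g.2, hmem, hc⟩

-- uniqueness: a set of cells has at most one well-formed grouping
-- takeWhile ++ dropWhile names the split used below
theorem hBR_eq {r : Int} {rest : List (Int × Int)} :
    rest.takeWhile (fun q => q.1 == r) ++ rest.dropWhile (fun q => q.1 == r) = rest :=
  List.takeWhile_append_dropWhile

theorem pv_grouping_unique (gl gl' : List (Int × List Int)) (hg : pvGood gl) (hg' : pvGood gl')
    (hm : ∀ p, pvMemG gl p ↔ pvMemG gl' p) : gl = gl' := by
  induction gl generalizing gl' with
  | nil =>
    cases gl' with
    | nil => rfl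
    | cons g t =>
      obtain ⟨c, hc⟩ := pv_good_key_mem _ hg' g List.mem_cons_self
      obtain ⟨L, hL, _⟩ := (hm (g.1, c)).mpr hc
      exact absurd hL List.not_mem_nil
  | cons g t ih =>
    cases gl' with
    | nil =>
      obtain ⟨c, hc⟩ := pv_good_key_mem _ hg g List.mem_cons_self
      obtain ⟨L, hL, _⟩ := (hm (g.1, c)).mp hc
      exact absurd hL List.not_mem_nil
    | cons g' t' =>
      have hkey : g.1 = g'.1 := by
        obtain ⟨c, hc⟩ := pv_good_key_mem _ hg g List.mem_cons_self
        obtain ⟨L, hL, _⟩ := (hm (g.1, c)).mp hc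
        obtain ⟨c', hc'⟩ := pv_good_key_mem _ hg' g' List.mem_cons_self
        obtain ⟨L', hL', _⟩ := (hm (g'.1, c')).mpr hc'
        have h1 : g.1 = g'.1 ∨ g'.1 < g.1 := by
          rcases List.mem_cons.mp hL with h | h
          · exact Or.inl (by simpa using congrArg Prod.fst h)
          · exact Or.inr (by simpa using (List.pairwise_cons.mp hg'.1).1 _ h)
        have h2 : g'.1 = g.1 ∨ g.1 < g'.1 := by
          rcases List.mem_cons.mp hL' with h | h
          · exact Or.inl (by simpa using congrArg Prod.fst h)
          · exact Or.inr (by simpa using (List.pairwise_cons.mp hg.1).1 _ h)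
        omega
      have hlist : g.2 = g'.2 := by
        apply pv_sorted_ext _ _ (hg.2 g List.mem_cons_self).2 (hg'.2 g' List.mem_cons_self).2
        intro x
        constructor
        · intro hx
          obtain ⟨L, hL, hxL⟩ := (hm (g.1, x)).mp ⟨g.2, List.mem_cons_self, hx⟩
          rcases List.mem_cons.mp hL with h | h
          · rw [← show L = g'.2 from congrArg Prod.snd h]; exact hxL
          · have := (List.pairwise_cons.mp hg'.1).1 _ h
            dsimp at this; omega
        · intro hx
          obtain ⟨L, hL, hxL⟩ := (hm (g'.1, x)).mpr ⟨g'.2, List.mem_cons_self, hx⟩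
          rcases List.mem_cons.mp hL with h | h
          · rw [← show L = g.2 from congrArg Prod.snd h]; exact hxL
          · have := (List.pairwise_cons.mp hg.1).1 _ h
            dsimp at this; omega
      have htg : pvGood t :=
        ⟨(List.pairwise_cons.mp hg.1).2, fun x hx => hg.2 x (List.mem_cons_of_mem _ hx)⟩
      have htg' : pvGood t' :=
        ⟨(List.pairwise_cons.mp hg'.1).2, fun x hx => hg'.2 x (List.mem_cons_of_mem _ hx)⟩
      have htail : t = t' := by
        apply ih t' htg htg'
        intro p
        constructor
        · intro hp
          obtain ⟨L, hL, hc⟩ := hp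
          have hlt : g.1 < p.1 := (List.pairwise_cons.mp hg.1).1 _ hL
          have := (hm p).mp ⟨L, List.mem_cons_of_mem _ hL, hc⟩
          rcases (pvMemG_cons _ _ _).mp this with ⟨h1, _⟩ | h
          · omega
          · exact h
        · intro hp
          obtain ⟨L, hL, hc⟩ := hp
          have hlt : g'.1 < p.1 := (List.pairwise_cons.mp hg'.1).1 _ hL
          have := (hm p).mpr ⟨L, List.mem_cons_of_mem _ hL, hc⟩
          rcases (pvMemG_cons _ _ _).mp this with ⟨h1, _⟩ | h
          · omega
          · exact h
      rw [htail, show g = g' from Prod.ext hkey hlist]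

-- pvGroupFst of a strictly lex-sorted list is a well-formed grouping with the same members
theorem pv_groupFst_good_aux (n : Nat) (pts : List (Int × Int)) (hlen : pts.length ≤ n)
    (hs : pts.Pairwise (fun a b => toLex a < toLex b)) :
    pvGood (pvGroupFst pts) ∧ ∀ p, pvMemG (pvGroupFst pts) p ↔ p ∈ pts := by
  induction n generalizing pts with
  | zero =>
    have : pts = [] := List.length_eq_zero_iff.mp (Nat.le_zero.mp hlen)
    subst this
    exact ⟨⟨by rw [pvGroupFst]; exact List.Pairwise.nil, by rw [pvGroupFst]; simp⟩,
           fun p => by rw [pvGroupFst]; simp [pvMemG]⟩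
  | succ n ih =>
    cases pts with
    | nil =>
      exact ⟨⟨by rw [pvGroupFst]; exact List.Pairwise.nil, by rw [pvGroupFst]; simp⟩,
             fun p => by rw [pvGroupFst]; simp [pvMemG]⟩
    | cons hd rest =>
      obtain ⟨r, c⟩ := hd
      rw [List.pairwise_cons] at hs
      obtain ⟨hhead, hrest⟩ := hs
      have hlex : ∀ q ∈ rest, r < q.1 ∨ (r = q.1 ∧ c < q.2) := by
        intro q hq
        have := hhead q hq
        rwa [Prod.Lex.toLex_lt_toLex] at this
      have hBfst : ∀ q ∈ rest.takeWhile (fun q => q.1 == r), q.1 = r :=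
        fun q hq => by simpa using List.mem_takeWhile_imp hq
      have hBmem : ∀ q ∈ rest.takeWhile (fun q => q.1 == r), q ∈ rest :=
        fun q hq => List.Sublist.mem hq (List.takeWhile_sublist _)
      have hRmem : ∀ q ∈ rest.dropWhile (fun q => q.1 == r), q ∈ rest :=
        fun q hq => List.Sublist.mem hq (List.dropWhile_sublist _)
      have hRpw : (rest.dropWhile (fun q => q.1 == r)).Pairwise (fun a b => toLex a < toLex b) :=
        List.Pairwise.sublist (List.dropWhile_sublist _) hrest
      have hRlt : ∀ q ∈ rest.dropWhile (fun q => q.1 == r), r < q.1 := by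
        cases hRc : rest.dropWhile (fun q => q.1 == r) with
        | nil => simp
        | cons q0 R' =>
          have hne : rest.dropWhile (fun q => q.1 == r) ≠ [] := by rw [hRc]; simp
          have hq0 : ¬ (q0.1 == r) = true := by
            have := List.head_dropWhile_not (p := fun q : Int × Int => q.1 == r) (l := rest) hne
            simp only [hRc, List.head_cons] at this
            simpa using this
          have hq0mem : q0 ∈ rest.dropWhile (fun q => q.1 == r) := by
            rw [hRc]; exact List.mem_cons_self
          have hq0r : r < q0.1 := by
            have := hlex q0 (hRmem q0 hq0mem)
            simp only [beq_iff_eq] at hq0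
            omega
          intro q hq
          rcases List.mem_cons.mp hq with h | h
          · subst h; exact hq0r
          · rw [hRc] at hRpw
            have := (List.pairwise_cons.mp hRpw).1 q h
            rw [Prod.Lex.toLex_lt_toLex] at this
            omega
      have hRlen : (rest.dropWhile (fun q => q.1 == r)).length ≤ n := by
        have h1 := List.length_dropWhile_le (fun q => (q.1 == r)) rest
        simp only [List.length_cons] at hlen
        omega
      obtain ⟨ihg, ihm⟩ := ih _ hRlen hRpw
      have hGkeys : ∀ g ∈ pvGroupFst (rest.dropWhile (fun q => q.1 == r)), r < g.1 := by
        intro g hg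
        obtain ⟨b, hb⟩ := pv_good_key_mem _ ihg g hg
        exact hRlt _ ((ihm (g.1, b)).mp hb)
      have hpwHead : (c :: (rest.takeWhile (fun q => q.1 == r)).map (fun q => q.2)).Pairwise (· < ·) := by
        rw [List.pairwise_cons]
        constructor
        · intro b hb
          obtain ⟨q, hq, rfl⟩ := List.mem_map.mp hb
          have := hlex q (hBmem q hq)
          have := hBfst q hq
          omega
        · rw [List.pairwise_map]
          apply List.Pairwise.imp_of_mem (R := fun a b => toLex a < toLex b)
          · intro a b ha hb hab
            rw [Prod.Lex.toLex_lt_toLex] at hab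
            have := hBfst a ha
            have := hBfst b hb
            omega
          · exact List.Pairwise.sublist (List.takeWhile_sublist _) hrest
      rw [show pvGroupFst ((r, c) :: rest)
            = (r, c :: (rest.takeWhile (fun q => q.1 == r)).map (fun q => q.2)) ::
              pvGroupFst (rest.dropWhile (fun q => q.1 == r)) from by rw [pvGroupFst]]
      refine ⟨⟨List.pairwise_cons.mpr ⟨fun g hg => hGkeys g hg, ihg.1⟩, ?_⟩, ?_⟩
      · intro g hg
        rcases List.mem_cons.mp hg with h | h
        · subst h; exact ⟨by simp, hpwHead⟩
        · exact ihg.2 g h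
      · intro p
        rw [pvMemG_cons, ihm]
        simp only [List.mem_cons]
        constructor
        · rintro (⟨h1, h2⟩ | h)
          · rcases h2 with h3 | h3
            · exact Or.inl (Prod.ext (by simpa using h1) (by simpa using h3))
            · obtain ⟨q, hq, hq2⟩ := List.mem_map.mp h3
              refine Or.inr ?_
              have hqp : q = p := Prod.ext (by rw [hBfst q hq, ← h1]) hq2
              rw [← hBR_eq (r := r) (rest := rest)]
              exact List.mem_append.mpr (Or.inl (hqp ▸ hq))
          · refine Or.inr ?_
            rw [← hBR_eq (r := r) (rest := rest)]
            exact List.mem_append.mpr (Or.inr h)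
        · rintro (h | h)
          · subst h; exact Or.inl ⟨rfl, Or.inl rfl⟩
          · rw [← hBR_eq (r := r) (rest := rest)] at h
            rcases List.mem_append.mp h with h | h
            · exact Or.inl ⟨hBfst p h, Or.inr (List.mem_map.mpr ⟨p, h, rfl⟩)⟩
            · exact Or.inr h

theorem pv_groupFst_good (pts : List (Int × Int))
    (hs : pts.Pairwise (fun a b => toLex a < toLex b)) :
    pvGood (pvGroupFst pts) ∧ ∀ p, pvMemG (pvGroupFst pts) p ↔ p ∈ pts :=
  pv_groupFst_good_aux pts.length pts le_rfl hs

theorem pvMemG_iff_exists (gl : List (Int × List Int)) (p : Int × Int) :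
    pvMemG gl p ↔ ∃ g ∈ gl, g.1 = p.1 ∧ p.2 ∈ g.2 := by
  constructor
  · rintro ⟨L, hL, hc⟩
    exact ⟨(p.1, L), hL, rfl, hc⟩
  · rintro ⟨g, hg, h1, h2⟩
    exact ⟨g.2, by rw [← h1]; exact hg, h2⟩

theorem pvMemG_map_id (gl : List (Int × List Int)) (vf : List Int → List Int) (p : Int × Int) :
    pvMemG (gl.map (fun g => (g.1, vf g.2))) p ↔ ∃ g ∈ gl, g.1 = p.1 ∧ p.2 ∈ vf g.2 := by
  constructor
  · rintro ⟨L, hL, hc⟩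
    obtain ⟨g, hg, hEq⟩ := List.mem_map.mp hL
    exact ⟨g, hg, congrArg Prod.fst hEq, (show vf g.2 = L from congrArg Prod.snd hEq) ▸ hc⟩
  · rintro ⟨g, hg, h1, h2⟩
    exact ⟨vf g.2, by rw [← h1]; exact List.mem_map.mpr ⟨g, hg, rfl⟩, h2⟩

theorem pvMemG_rev_map (m : Int) (gl : List (Int × List Int)) (vf : List Int → List Int) (p : Int × Int) :
    pvMemG (gl.reverse.map (fun g => (m - g.1, vf g.2))) p ↔ ∃ g ∈ gl, m - g.1 = p.1 ∧ p.2 ∈ vf g.2 := by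
  constructor
  · rintro ⟨L, hL, hc⟩
    obtain ⟨g, hg, hEq⟩ := List.mem_map.mp hL
    exact ⟨g, List.mem_reverse.mp hg, congrArg Prod.fst hEq,
           (show vf g.2 = L from congrArg Prod.snd hEq) ▸ hc⟩
  · rintro ⟨g, hg, h1, h2⟩
    exact ⟨vf g.2, by rw [← h1]; exact List.mem_map.mpr ⟨g, List.mem_reverse.mpr hg, rfl⟩, h2⟩

-- reflect-an-ascending-run facts
theorem pv_mem_rc (m b : Int) (L : List Int) : b ∈ L.reverse.map (fun x => m - x) ↔ m - b ∈ L := by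
  rw [List.mem_map]
  constructor
  · rintro ⟨x, hx, rfl⟩
    have hxx : m - (m - x) = x := by omega
    rw [hxx]
    exact List.mem_reverse.mp hx
  · intro hb
    exact ⟨m - b, List.mem_reverse.mpr hb, by omega⟩

theorem pv_rc_pairwise (m : Int) (L : List Int) (h : L.Pairwise (· < ·)) :
    (L.reverse.map (fun x => m - x)).Pairwise (· < ·) := by
  rw [List.pairwise_map, List.pairwise_reverse]
  exact h.imp (fun hab => by omega)

theorem pv_rc_ne_nil (m : Int) (L : List Int) (h : L ≠ []) :
    L.reverse.map (fun x => m - x) ≠ [] := by simp [h]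

theorem pvGood_map_rc (m : Int) (gl : List (Int × List Int)) (h : pvGood gl) :
    pvGood (gl.map (fun g => (g.1, g.2.reverse.map (fun x => m - x)))) := by
  constructor
  · rw [List.pairwise_map]
    exact h.1.imp (fun hab => hab)
  · intro g hg
    obtain ⟨g0, hg0, rfl⟩ := List.mem_map.mp hg
    exact ⟨pv_rc_ne_nil _ _ (h.2 g0 hg0).1, pv_rc_pairwise _ _ (h.2 g0 hg0).2⟩

theorem pvGood_rev_map (m : Int) (vf : List Int → List Int)
    (hne : ∀ L, L ≠ [] → vf L ≠ []) (hpw : ∀ L, L.Pairwise (· < ·) → (vf L).Pairwise (· < ·))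
    (gl : List (Int × List Int)) (h : pvGood gl) :
    pvGood (gl.reverse.map (fun g => (m - g.1, vf g.2))) := by
  constructor
  · rw [List.pairwise_map, List.pairwise_reverse]
    exact h.1.imp (fun hab => by omega)
  · intro g hg
    obtain ⟨g0, hg0, rfl⟩ := List.mem_map.mp hg
    have := h.2 g0 (List.mem_reverse.mp hg0)
    exact ⟨hne _ this.1, hpw _ this.2⟩

-- sorted(set) is strictly lex-increasing
theorem pv_sorted_lex_pairwise (S : List (Int × Int)) (hnd : S.Nodup) :
    (PySem.List.sorted S (fun p => toLex p) false).Pairwise (fun a b => toLex a < toLex b) := by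
  have hle := PySem.List.sorted_pairwise S (fun p => toLex p)
  have hndp : (PySem.List.sorted S (fun p => toLex p) false).Nodup :=
    (PySem.List.sorted_perm S (fun p => toLex p) false).nodup_iff.mpr hnd
  exact (hle.and hndp).imp (fun hab =>
    lt_of_le_of_ne hab.1 (fun he => hab.2 (by simpa using he)))

-- A's set-equality test equals B's grouping-equality test, for a bijective transform T
theorem pv_equal_grouping (S : PySem.Set (Int × Int)) (hnd : List.Nodup S)
    (T T' : Int × Int → Int × Int) (hTT' : ∀ p, T (T' p) = p) (hT'T : ∀ p, T' (T p) = p)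
    (F : List (Int × List Int)) (hF : pvGood F)
    (hFm : ∀ p, pvMemG F p ↔ T' p ∈ S) :
    PySem.Set.equal S (PySem.Set.ofList (S.map T))
      = decide (pvGroupFst (PySem.List.sorted S (fun p => toLex p) false) = F) := by
  have hlt := pv_sorted_lex_pairwise S hnd
  obtain ⟨hrowsG, hrowsM⟩ := pv_groupFst_good _ hlt
  have hmapT : ∀ p : Int × Int, p ∈ S.map T ↔ T' p ∈ S := by
    intro p
    rw [List.mem_map]
    constructor
    · rintro ⟨q, hq, rfl⟩
      rw [hT'T]
      exact hq
    · intro hp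
      exact ⟨T' p, hp, hTT' p⟩
  rw [Bool.eq_iff_iff, PySem.Set.equal_iff, decide_eq_true_iff]
  constructor
  · intro hall
    apply pv_grouping_unique _ _ hrowsG hF
    intro p
    rw [hrowsM, hFm, PySem.List.mem_sorted, ← hmapT p,
        show (p ∈ List.map T S) ↔ p ∈ PySem.Set.ofList (List.map T S) from
          (PySem.Set.mem_ofList _ _).symm]
    exact hall p
  · intro heq x
    have h1 := hrowsM x
    rw [heq] at h1
    rw [PySem.Set.mem_ofList, hmapT x, ← hFm x, h1, PySem.List.mem_sorted]

-- concrete (beta-reduced) instances used by the flag proofs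
theorem pvMemG_map_rc (m : Int) (gl : List (Int × List Int)) (p : Int × Int) :
    pvMemG (gl.map (fun g => (g.1, g.2.reverse.map (fun x => m - x)))) p
      ↔ ∃ g ∈ gl, g.1 = p.1 ∧ p.2 ∈ g.2.reverse.map (fun x => m - x) :=
  pvMemG_map_id gl (fun L => L.reverse.map (fun x => m - x)) p

theorem pvMemG_rev_id (m : Int) (gl : List (Int × List Int)) (p : Int × Int) :
    pvMemG (gl.reverse.map (fun g => (m - g.1, g.2))) p
      ↔ ∃ g ∈ gl, m - g.1 = p.1 ∧ p.2 ∈ g.2 :=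
  pvMemG_rev_map m gl (fun L => L) p

theorem pvMemG_rev_rc (m m' : Int) (gl : List (Int × List Int)) (p : Int × Int) :
    pvMemG (gl.reverse.map (fun g => (m - g.1, g.2.reverse.map (fun x => m' - x)))) p
      ↔ ∃ g ∈ gl, m - g.1 = p.1 ∧ p.2 ∈ g.2.reverse.map (fun x => m' - x) :=
  pvMemG_rev_map m gl (fun L => L.reverse.map (fun x => m' - x)) p

theorem pvGood_rev_id (m : Int) (gl : List (Int × List Int)) (h : pvGood gl) :
    pvGood (gl.reverse.map (fun g => (m - g.1, g.2))) :=
  pvGood_rev_map m (fun L => L) (fun _ hL => hL) (fun _ hL => hL) gl h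

theorem pvGood_rev_rc (m m' : Int) (gl : List (Int × List Int)) (h : pvGood gl) :
    pvGood (gl.reverse.map (fun g => (m - g.1, g.2.reverse.map (fun x => m' - x)))) :=
  pvGood_rev_map m (fun L => L.reverse.map (fun x => m' - x))
    (pv_rc_ne_nil m') (pv_rc_pairwise m') gl h

-- ===== VERDICT (by name: the statement is the Claim_ definition above) =====
theorem symmetry_flags_spec : Claim_equal_symmetry_flags := by
  intro cells _ hpre
  unfold Spec_symmetry_flags symmetry_flags symmetry_flags_alt
  have hrs : cells.map (fun p => p.1) ≠ [] := fun h => hpre (List.map_eq_nil_iff.mp h)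
  have hcs : cells.map (fun p => p.2) ≠ [] := fun h => hpre (List.map_eq_nil_iff.mp h)
  obtain ⟨a, ha⟩ := Option.ne_none_iff_exists'.mp
    (fun h => hrs ((PySem.List.min?_eq_none_iff (κ := Int) _ (fun x => x)).mp h))
  obtain ⟨b, hb⟩ := Option.ne_none_iff_exists'.mp
    (fun h => hcs ((PySem.List.min?_eq_none_iff (κ := Int) _ (fun x => x)).mp h))
  obtain ⟨c, hc⟩ := Option.ne_none_iff_exists'.mp
    (fun h => hrs ((PySem.List.max?_eq_none_iff (κ := Int) _ (fun x => x)).mp h))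
  obtain ⟨d, hd⟩ := Option.ne_none_iff_exists'.mp
    (fun h => hcs ((PySem.List.max?_eq_none_iff (κ := Int) _ (fun x => x)).mp h))
  dsimp only
  rw [ha, hb, hc, hd]
  dsimp only
  set S : PySem.Set (Int × Int) :=
    PySem.Set.ofList (cells.map (fun p => (p.1 - a, p.2 - b))) with hSdef
  have hnd : List.Nodup S := PySem.Set.nodup_ofList _
  have hlt := pv_sorted_lex_pairwise S hnd
  obtain ⟨hrG, hrM⟩ := pv_groupFst_good _ hlt
  set rows := pvGroupFst (PySem.List.sorted S (fun p => toLex p) false) with hrowsdef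
  have hmemrow : ∀ p : Int × Int, pvMemG rows p ↔ p ∈ S :=
    fun p => (hrM p).trans (PySem.List.mem_sorted _ _ _ _)
  -- the transposed grouping
  set ptsT := (PySem.List.sorted S (fun p => toLex p) false).map (fun p => (p.2, p.1)) with hptsTdef
  have hndT : List.Nodup ptsT := by
    apply List.Nodup.map
    · intro p q hpq
      exact Prod.ext (congrArg Prod.snd hpq) (congrArg Prod.fst hpq)
    · exact (PySem.List.sorted_perm S (fun p => toLex p) false).nodup_iff.mpr hnd
  have hltT := pv_sorted_lex_pairwise ptsT hndT
  obtain ⟨hcG, hcM⟩ := pv_groupFst_good _ hltT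
  set cols := pvGroupFst (PySem.List.sorted ptsT (fun p => toLex p) false) with hcolsdef
  have hmemcol : ∀ p : Int × Int, pvMemG cols p ↔ ((p.2, p.1) : Int × Int) ∈ S := by
    intro p
    rw [(hcM p).trans (PySem.List.mem_sorted _ _ _ _), hptsTdef, List.mem_map]
    constructor
    · rintro ⟨q, hq, rfl⟩
      rwa [PySem.List.mem_sorted] at hq
    · intro hp
      exact ⟨(p.2, p.1), (PySem.List.mem_sorted _ _ _ _).mpr hp, rfl⟩
  simp only [List.cons.injEq, Prod.mk.injEq, true_and, and_true]
  refine ⟨?_, ?_, ?_, ?_⟩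
  · -- hflip
    apply pv_equal_grouping S hnd (fun p => (p.1, d - b - p.2)) (fun p => (p.1, d - b - p.2))
      (fun p => Prod.ext rfl (by dsimp; omega)) (fun p => Prod.ext rfl (by dsimp; omega))
    · exact pvGood_map_rc (d - b) rows hrG
    · intro p
      rw [pvMemG_map_rc, ← hmemrow (p.1, d - b - p.2), pvMemG_iff_exists]
      exact exists_congr fun g => and_congr_right fun _ =>
        and_congr Iff.rfl (pv_mem_rc (d - b) p.2 g.2)
  · -- vflip
    apply pv_equal_grouping S hnd (fun p => (c - a - p.1, p.2)) (fun p => (c - a - p.1, p.2))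
      (fun p => Prod.ext (by dsimp; omega) rfl) (fun p => Prod.ext (by dsimp; omega) rfl)
    · exact pvGood_rev_id (c - a) rows hrG
    · intro p
      rw [pvMemG_rev_id, ← hmemrow (c - a - p.1, p.2), pvMemG_iff_exists]
      exact exists_congr fun g => and_congr_right fun _ =>
        and_congr (by constructor <;> (intro h; omega)) Iff.rfl
  · -- rot180
    apply pv_equal_grouping S hnd (fun p => (c - a - p.1, d - b - p.2)) (fun p => (c - a - p.1, d - b - p.2))
      (fun p => Prod.ext (by dsimp; omega) (by dsimp; omega))
      (fun p => Prod.ext (by dsimp; omega) (by dsimp; omega))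
    · exact pvGood_rev_rc (c - a) (d - b) rows hrG
    · intro p
      rw [pvMemG_rev_rc, ← hmemrow (c - a - p.1, d - b - p.2), pvMemG_iff_exists]
      exact exists_congr fun g => and_congr_right fun _ =>
        and_congr (by constructor <;> (intro h; omega)) (pv_mem_rc (d - b) p.2 g.2)
  · -- rot90
    by_cases hsq : c - a = d - b
    · rw [if_pos hsq, decide_eq_true hsq, Bool.true_and]
      apply pv_equal_grouping S hnd (fun p => (p.2, c - a - p.1)) (fun p => (c - a - p.2, p.1))
        (fun p => Prod.ext (by dsimp) (by dsimp; omega))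
        (fun p => Prod.ext (by dsimp; omega) (by dsimp))
      · exact pvGood_map_rc (c - a) cols hcG
      · intro p
        rw [pvMemG_map_rc, ← hmemcol (p.1, c - a - p.2), pvMemG_iff_exists]
        exact exists_congr fun g => and_congr_right fun _ =>
          and_congr Iff.rfl (pv_mem_rc (c - a) p.2 g.2)
    · rw [if_neg hsq, decide_eq_false hsq, Bool.false_and]
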